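-- pv_equiv track=rewrite | github.com/Ostern18/lemkin-website | modules/lemkin-frameworks/lemkin-forensics/src/lemkin_forensics/network_processor.py | _is_dga_domain
-- ===== SOURCE A (Python) =====
-- def _is_dga_domain(domain: str) -> bool:
--     """Check if domain appears to be generated by DGA"""
--     # Simple heuristic for DGA detection
--     if len(domain) > 20:  # Very long domains
--         return True
--
--     # Count consonant clusters
--     consonants = 'bcdfghjklmnpqrstvwxyz'
--     consecutive_consonants = 0
--     max_consecutive = 0
--
--     for char in domain.lower():
--         if char in consonants:
--             consecutive_consonants += 1
--             max_consecutive = max(max_consecutive, consecutive_consonants)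
--         else:
--             consecutive_consonants = 0
--
--     return max_consecutive > 4  # Too many consecutive consonants
-- ===== SOURCE B (Python) =====
-- def _is_dga_domain(domain: str) -> bool:
--     """Check if domain appears to be generated by DGA"""
--     if len(domain) > 20:  # Very long domains
--         return True
--     consonants = 'bcdfghjklmnpqrstvwxyz'
--     # Materialize the maximal consonant runs, then check for a long one.
--     marked = ''.join(ch if ch in consonants else ' ' for ch in domain.lower())
--     return any(len(run) > 4 for run in marked.split())
-- ===== Notes on version B (the rewrite author's own statement) =====
-- stated objective: idiomatic
-- what changed: Instead of a per-character running counter with reset-on-vowel, B materializes all maximal consonant runs at once (non-consonants mapped to spaces, then str.split) and checks whether any run is longer than 4.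
import Mathlib
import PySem

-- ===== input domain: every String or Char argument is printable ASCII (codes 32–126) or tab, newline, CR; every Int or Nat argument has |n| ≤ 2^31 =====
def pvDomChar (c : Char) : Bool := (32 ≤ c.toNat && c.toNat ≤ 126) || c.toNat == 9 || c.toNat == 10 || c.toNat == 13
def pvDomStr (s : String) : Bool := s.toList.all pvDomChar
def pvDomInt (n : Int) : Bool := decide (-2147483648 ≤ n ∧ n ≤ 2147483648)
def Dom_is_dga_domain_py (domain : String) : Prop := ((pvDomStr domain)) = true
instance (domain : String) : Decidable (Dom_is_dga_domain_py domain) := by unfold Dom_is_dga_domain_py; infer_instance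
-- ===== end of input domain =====

-- B replaces A's running consonant counter by materializing the maximal consonant runs and checking any of them is long (idiomatic, same cost); return value only, no side effects.

-- shared alphabet constant ('consonants' in both Pythons) and the membership test 'char in consonants'
def pvConsonants : List Char :=
  ['b','c','d','f','g','h','j','k','l','m','n','p','q','r','s','t','v','w','x','y','z']

def pvIsCons (ch : Char) : Bool := PySem.Chars.isIn [ch] pvConsonants

-- ===== PORT A =====
-- loop body: consecutive_consonants, max_consecutive
def pvStepA (st : Nat × Nat) (ch : Char) : Nat × Nat :=
  if pvIsCons ch then (st.1 + 1, max st.2 (st.1 + 1)) else (0, st.2)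

def is_dga_domain_py (domain : String) : Bool :=
  if PySem.Str.len domain > 20 then true
  else
    decide (((PySem.Str.lower domain).toList.foldl pvStepA (0, 0)).2 > 4)

-- ===== PORT B =====
def pvMark (ch : Char) : Char := if pvIsCons ch then ch else ' '

def is_dga_domain_py_alt (domain : String) : Bool :=
  if PySem.Str.len domain > 20 then true
  else
    (PySem.Chars.split₀ ((PySem.Str.lower domain).toList.map pvMark)).any
      (fun run => decide (run.length > 4))

-- ===== PRECONDITION & SPEC =====
def Spec_is_dga_domain_py (domain : String) (out : Bool) : Prop := out = is_dga_domain_py_alt domain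
instance (domain : String) (out : Bool) : Decidable (Spec_is_dga_domain_py domain out) := by unfold Spec_is_dga_domain_py; infer_instance

-- ===== CLAIM (what is proved, stated in full; the proofs are below) =====
def Claim_equal_is_dga_domain_py : Prop := ∀ (domain : String), Dom_is_dga_domain_py domain → Spec_is_dga_domain_py domain (is_dga_domain_py domain)

-- ===== LEMMAS AND PROOFS =====

-- pvG l c: A's max_consecutive over l when the current run already has length c (only runs recorded by an increment)
def pvG : List Char → Nat → Nat
  | [], _ => 0
  | ch :: t, c => if pvIsCons ch then max (c + 1) (pvG t (c + 1)) else pvG t 0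

-- pvH l c: like pvG but the pending run (length c) also counts — matches split₀'s trailing piece
def pvH : List Char → Nat → Nat
  | [], c => c
  | ch :: t, c => if pvIsCons ch then pvH t (c + 1) else max c (pvH t 0)

lemma pvFoldA (l : List Char) (c m : Nat) :
    (l.foldl pvStepA (c, m)).2 = max m (pvG l c) := by
  induction l generalizing c m with
  | nil => simp [pvG]
  | cons ch t ih =>
    simp only [List.foldl_cons, pvStepA, pvG]
    by_cases h : pvIsCons ch = true
    · simp only [h, if_pos]
      rw [ih]
      omega
    · simp only [h, Bool.false_eq_true, if_false, ih]

lemma pvH_eq (l : List Char) (c : Nat) : pvH l c = max c (pvG l c) := by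
  induction l generalizing c with
  | nil => simp [pvH, pvG]
  | cons ch t ih =>
    simp only [pvH, pvG]
    by_cases h : pvIsCons ch = true
    · simp only [h, if_pos, ih]
      omega
    · simp only [h, Bool.false_eq_true, if_false, ih]
      omega

lemma pvIsCons_not_space (ch : Char) (h : pvIsCons ch = true) :
    PySem.Chars.isspace ch = false := by
  have hm : ch ∈ pvConsonants := by
    have := (PySem.Chars.isIn_iff_infix [ch] pvConsonants).1 h
    exact this.subset (List.mem_singleton_self ch)
  fin_cases hm <;> decide

lemma pvGo (l cur : List Char) (acc : List (List Char)) :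
    (PySem.Chars.split₀.go (l.map pvMark) cur acc).any (fun run => decide (run.length > 4))
      = (acc.any (fun run => decide (run.length > 4)) || decide (pvH l cur.length > 4)) := by
  induction l generalizing cur acc with
  | nil =>
    simp only [List.map_nil, PySem.Chars.split₀.go, pvH]
    by_cases h : cur.isEmpty = true
    · have : cur.length = 0 := by simpa [List.isEmpty_iff_length_eq_zero] using h
      simp [h, this]
    · simp [h, List.any_reverse, Bool.or_comm]
  | cons ch t ih =>
    simp only [List.map_cons, pvMark]
    by_cases h : pvIsCons ch = true
    · rw [if_pos h]
      rw [PySem.Chars.split₀.go]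
      rw [if_neg (by simp [pvIsCons_not_space ch h])]
      rw [ih (ch :: cur) acc]
      simp [pvH, h]
    · rw [if_neg h]
      rw [PySem.Chars.split₀.go]
      rw [if_pos (by decide)]
      by_cases hc : cur.isEmpty = true
      · have hl : cur.length = 0 := by simpa [List.isEmpty_iff_length_eq_zero] using hc
        rw [if_pos hc, ih [] acc]
        simp [pvH, h, hl]
      · rw [if_neg hc, ih [] (cur.reverse :: acc)]
        have hmax : (max cur.length (pvH t 0) > 4) ↔ (cur.length > 4 ∨ pvH t 0 > 4) := by omega
        simp [pvH, h, hmax, Bool.decide_or, Bool.or_assoc, Bool.or_comm, Bool.or_left_comm]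

-- ===== VERDICT (by name: the statement is the Claim_ definition above) =====
theorem is_dga_domain_py_spec : Claim_equal_is_dga_domain_py := by
  intro domain _
  unfold Spec_is_dga_domain_py is_dga_domain_py is_dga_domain_py_alt
  by_cases hlen : PySem.Str.len domain > 20
  · rw [if_pos hlen, if_pos hlen]
  · rw [if_neg hlen, if_neg hlen]
    rw [show PySem.Chars.split₀ ((PySem.Str.lower domain).toList.map pvMark)
          = PySem.Chars.split₀.go ((PySem.Str.lower domain).toList.map pvMark) [] [] from rfl]
    rw [pvGo, pvFoldA]
    simp [pvH_eq]
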